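-- pv_equiv track=rewrite | github.com/ryuji-ito-0222/python-practice | main.py | snake_string_v1
-- ===== SOURCE A (Python) =====
-- from typing import List, Tuple, Optional, Iterator, Generator
--
-- def snake_string_v1(chars: str) -> List[List[str]]:
--     result = [[], [], []]
--     result_indexes = {0, 1, 2}
--     insert_index = 1
--     for i, s in enumerate(chars):
--         if i % 4 == 1:
--             insert_index = 0
--         elif i % 2 == 0:
--             insert_index = 1
--         elif i % 4 == 3:
--             insert_index = 2
--         result[insert_index].append(s)
--         for rest_index in result_indexes - {insert_index}:
--             result[rest_index].append(" ")
--     return result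
-- ===== SOURCE B (Python) =====
-- from typing import List
--
-- def snake_string_v1(chars: str) -> List[List[str]]:
--     def target(i):
--         return 1 if i % 2 == 0 else (0 if i % 4 == 1 else 2)
--     return [[c if target(i) == r else " " for i, c in enumerate(chars)]
--             for r in range(3)]
-- ===== Notes on version B (the rewrite author's own statement) =====
-- stated objective: simpler
-- what changed: B builds each of the three rows in its own independent row-major pass from a closed-form target-row function, instead of A's single column-major loop that mutates three lists in parallel with a carried insert_index and a set difference.
import Mathlib
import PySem

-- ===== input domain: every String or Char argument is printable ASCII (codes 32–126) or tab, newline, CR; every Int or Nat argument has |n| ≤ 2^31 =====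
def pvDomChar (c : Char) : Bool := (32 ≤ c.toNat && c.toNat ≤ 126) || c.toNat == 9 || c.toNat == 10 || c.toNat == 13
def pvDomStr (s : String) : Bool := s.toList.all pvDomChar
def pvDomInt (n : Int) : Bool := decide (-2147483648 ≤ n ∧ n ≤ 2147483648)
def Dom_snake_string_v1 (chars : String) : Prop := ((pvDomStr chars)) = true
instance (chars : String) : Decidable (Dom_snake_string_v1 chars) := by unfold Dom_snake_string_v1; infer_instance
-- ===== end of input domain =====

-- B replaces A's column-major loop (carried insert_index, parallel mutation of three rows
-- via a set difference) by three independent row-major passes from a closed-form target-row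
-- function; objective: simpler.

-- ===== PORT A =====
-- enumerate(chars) with Nat indices (indices are always ≥ 0 here)
def snakeEnum (n : Nat) : List Char → List (Nat × Char)
  | [] => []
  | c :: l => (n, c) :: snakeEnum (n + 1) l

-- one iteration of A's loop body; state = (result rows, insert_index)
def snakeStep (st : List (List String) × Nat) (p : Nat × Char) : List (List String) × Nat :=
  let i := p.1
  let insert_index :=
    if i % 4 == 1 then 0
    else if i % 2 == 0 then 1
    else if i % 4 == 3 then 2
    else st.2
  let result := st.1.modify insert_index (fun row => row ++ [String.ofList [p.2]])
  -- CPython iterates the small-int set {0,1,2} - {insert_index} in ascending order; exact here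
  let result := (([0, 1, 2].filter (fun j => j ≠ insert_index)).foldl
      (fun r j => r.modify j (fun row => row ++ [" "])) result)
  (result, insert_index)

def snake_string_v1 (chars : String) : List (List String) :=
  ((snakeEnum 0 chars.toList).foldl snakeStep ([[], [], []], 1)).1

-- ===== PORT B =====
def snakeTarget (i : Nat) : Nat :=
  if i % 2 == 0 then 1 else if i % 4 == 1 then 0 else 2

def snake_string_v1_alt (chars : String) : List (List String) :=
  (List.range 3).map (fun r =>
    (snakeEnum 0 chars.toList).map
      (fun p => if snakeTarget p.1 == r then String.ofList [p.2] else " "))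

-- ===== PRECONDITION & SPEC =====
def Spec_snake_string_v1 (chars : String) (out : List (List String)) : Prop := out = snake_string_v1_alt chars
instance (chars : String) (out : List (List String)) : Decidable (Spec_snake_string_v1 chars out) := by unfold Spec_snake_string_v1; infer_instance

-- ===== CLAIM (what is proved, stated in full; the proofs are below) =====
def Claim_equal_snake_string_v1 : Prop := ∀ (chars : String), Dom_snake_string_v1 chars → Spec_snake_string_v1 chars (snake_string_v1 chars)

-- ===== LEMMAS AND PROOFS =====
def snakeRow (r : Nat) (l : List (Nat × Char)) : List String :=
  l.map (fun p => if snakeTarget p.1 == r then String.ofList [p.2] else " ")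

lemma snake_inv (l : List Char) : ∀ (n : Nat) (a b c : List String) (ii : Nat),
    ((snakeEnum n l).foldl snakeStep ([a, b, c], ii)).1
      = [a ++ snakeRow 0 (snakeEnum n l),
         b ++ snakeRow 1 (snakeEnum n l),
         c ++ snakeRow 2 (snakeEnum n l)] := by
  induction l with
  | nil => intro n a b c ii; simp [snakeEnum, snakeRow]
  | cons ch l ih =>
    intro n a b c ii
    have h4 : n % 4 = 0 ∨ n % 4 = 1 ∨ n % 4 = 2 ∨ n % 4 = 3 := by omega
    have h2 : n % 2 = n % 4 % 2 := by omega
    rcases h4 with h | h | h | h <;>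
      simp [snakeEnum, snakeStep, snakeRow, snakeTarget, h, h2, List.modify, ih,
        List.filter]

theorem snake_string_v1_spec : Claim_equal_snake_string_v1 := by
  intro chars _
  unfold Spec_snake_string_v1 snake_string_v1 snake_string_v1_alt
  rw [snake_inv]
  simp [List.range, List.range.loop, snakeRow]
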